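-- pv_equiv track=rewrite | github.com/lumirevel/baekjoon | baek25490.py | maxRangeConquer
-- ===== SOURCE A (Python) =====
-- def maxRangeConquer(B, i, j):
--     if i == j:
--         return [(i,i,i)]
--     elif j < i:
--         return []
--     else:
--         maxIndex = i
--         for nowIndex in range(i,j+1):
--             if B[maxIndex] < B[nowIndex]:
--                 maxIndex = nowIndex
--         return maxRangeConquer(B, i, maxIndex-1) + [(i, maxIndex, j)] + maxRangeConquer(B, maxIndex+1, j)
-- ===== SOURCE B (Python) =====
-- def maxRangeConquer(B, i, j):
--     # Stack-based Cartesian-tree build (leftmost max on top), then an explicit-stack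
--     # in-order traversal emitting (segment_left, max_index, segment_right).
--     if i == j:
--         return [(i, i, i)]
--     if j < i:
--         return []
--     stack = []  # pairs (left_subtree, index); top of stack at the end
--     for k in range(i, j + 1):
--         left = None
--         while stack and B[stack[-1][1]] < B[k]:
--             t, m = stack.pop()
--             left = (t, m, left)
--         stack.append((left, k))
--     tree = None
--     for t, m in reversed(stack):
--         tree = (t, m, tree)
--     return _emit(tree, i, j)
--
-- def _emit(tree, lo, hi):
--     # in-order traversal with an explicit work stack; (True, triple) means emit triple
--     out = []
--     work = [(False, (tree, lo, hi))]
--     while work: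
--         is_emit, item = work.pop()
--         if is_emit:
--             out.append(item)
--         else:
--             t, lo, hi = item
--             if t is not None:
--                 l, m, r = t
--                 work.append((False, (r, m + 1, hi)))
--                 work.append((True, (lo, m, hi)))
--                 work.append((False, (l, lo, m - 1)))
--     return out
-- ===== Notes on version B (the rewrite author's own statement) =====
-- stated objective: alternative
-- what changed: Replaced A's recursive max-split (a fresh linear max scan of every segment at every recursion level) by a one-pass stack-based Cartesian-tree build followed by a single explicit-stack in-order traversal emitting the (left,max,right) tuples.
import Mathlib
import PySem

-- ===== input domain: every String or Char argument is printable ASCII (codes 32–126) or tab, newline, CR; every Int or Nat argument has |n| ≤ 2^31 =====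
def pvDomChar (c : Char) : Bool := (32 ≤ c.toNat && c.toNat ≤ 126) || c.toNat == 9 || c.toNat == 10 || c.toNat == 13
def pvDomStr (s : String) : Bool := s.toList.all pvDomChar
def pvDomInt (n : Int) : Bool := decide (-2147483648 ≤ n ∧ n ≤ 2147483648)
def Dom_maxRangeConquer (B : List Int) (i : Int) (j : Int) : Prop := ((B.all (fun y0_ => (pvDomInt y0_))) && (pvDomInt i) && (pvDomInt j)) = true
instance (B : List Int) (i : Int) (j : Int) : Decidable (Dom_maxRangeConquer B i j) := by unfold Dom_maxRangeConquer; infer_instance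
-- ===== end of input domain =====

-- B replaces A's recursive max-split with a single-pass stack-based Cartesian-tree build
-- followed by one explicit-stack in-order traversal (an alternative algorithm, same values).

-- ===== PORT A =====
-- A's 'for nowIndex in range(i, j+1)' first-argmax scan, as a foldl over the same range
def pvMaxLoop (v : Int → Int) (i j : Int) : Int :=
  (PySem.List.pyRange i (j + 1) 1).foldl
    (fun maxIndex nowIndex => if v maxIndex < v nowIndex then nowIndex else maxIndex) i

-- needed by the ports' termination proofs: the scan result is the start index or a scanned index
theorem pvMaxLoop_choice (v : Int → Int) :
    ∀ (l : List Int) (a : Int),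
      l.foldl (fun m k => if v m < v k then k else m) a = a ∨
      l.foldl (fun m k => if v m < v k then k else m) a ∈ l := by
  intro l
  induction l with
  | nil => intro a; left; rfl
  | cons x xs ih =>
    intro a
    simp only [List.foldl_cons]
    rcases ih (if v a < v x then x else a) with h | h
    · rw [h]; split
      · right; simp
      · left; rfl
    · right; simp [h]

theorem pvMaxLoop_bounds (v : Int → Int) (i j : Int) (hij : i ≤ j) :
    i ≤ pvMaxLoop v i j ∧ pvMaxLoop v i j ≤ j := by
  unfold pvMaxLoop
  rcases pvMaxLoop_choice v (PySem.List.pyRange i (j + 1) 1) i with h | h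
  · rw [h]; omega
  · rw [PySem.List.mem_pyRange_one] at h; omega

-- Port of A.  Python raises IndexError outside Pre_; there pyGetD's default is never relied on.
def maxRangeConquer (B : List Int) (i : Int) (j : Int) : List (Int × Int × Int) :=
  if h1 : i = j then [(i, i, i)]
  else if h2 : j < i then []
  else
    let maxIndex := pvMaxLoop (fun k => PySem.List.pyGetD B k 0) i j
    maxRangeConquer B i (maxIndex - 1) ++ [(i, maxIndex, j)] ++ maxRangeConquer B (maxIndex + 1) j
termination_by (j + 1 - i).toNat
decreasing_by
  · have hb := pvMaxLoop_bounds (fun k => PySem.List.pyGetD B k 0) i j (by omega)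
    omega
  · have hb := pvMaxLoop_bounds (fun k => PySem.List.pyGetD B k 0) i j (by omega)
    omega

-- ===== PORT B =====
inductive PVTree where
  | leaf : PVTree
  | node : PVTree → Int → PVTree → PVTree
deriving DecidableEq, Repr

-- Source B's inner 'while stack and B[stack[-1][1]] < B[k]' pop loop; stack head = top of stack
def pvPopLoop (v : Int → Int) (x : Int) : List (PVTree × Int) → PVTree → PVTree × List (PVTree × Int)
  | [], left => (left, [])
  | (t, m) :: rest, left =>
      if v m < v x then pvPopLoop v x rest (PVTree.node t m left)
      else (left, (t, m) :: rest)

-- one iteration of Source B's 'for k in range(i, j+1)' loop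
def pvStep (v : Int → Int) (s : List (PVTree × Int)) (k : Int) : List (PVTree × Int) :=
  let p := pvPopLoop v k s PVTree.leaf
  (p.1, k) :: p.2

-- Source B's 'for t, m in reversed(stack)' collapse of the remaining stack into one tree
def pvCollapse (s : List (PVTree × Int)) : PVTree :=
  s.foldl (fun acc tm => PVTree.node tm.1 tm.2 acc) PVTree.leaf

def pvSize : PVTree → Nat
  | PVTree.leaf => 0
  | PVTree.node l _ r => pvSize l + pvSize r + 1

-- weight of one work item of Source B's _emit loop (termination measure only)
def pvEmitItemW : Sum (PVTree × Int × Int) (Int × Int × Int) → Nat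
  | Sum.inl (t, _, _) => 3 * pvSize t + 1
  | Sum.inr _ => 1

-- Source B's _emit 'while work' loop; work-stack head = top, Sum.inr = (True, triple) emit items
def pvEmitLoop : List (Sum (PVTree × Int × Int) (Int × Int × Int)) → List (Int × Int × Int) → List (Int × Int × Int)
  | [], out => out
  | Sum.inr x :: rest, out => pvEmitLoop rest (out ++ [x])
  | Sum.inl (PVTree.leaf, _, _) :: rest, out => pvEmitLoop rest out
  | Sum.inl (PVTree.node l m r, lo, hi) :: rest, out =>
      pvEmitLoop (Sum.inl (l, lo, m - 1) :: Sum.inr (lo, m, hi) :: Sum.inl (r, m + 1, hi) :: rest) out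
termination_by items _ => (items.map pvEmitItemW).sum
decreasing_by
  · simp [pvEmitItemW]
  · simp [pvEmitItemW]
  · simp [pvEmitItemW, pvSize]; omega

-- Source B's _emit: explicit-stack in-order traversal producing (segment_left, max_index, segment_right)
def pvEmitIter (t : PVTree) (lo hi : Int) : List (Int × Int × Int) :=
  pvEmitLoop [Sum.inl (t, lo, hi)] []

def maxRangeConquer_alt (B : List Int) (i : Int) (j : Int) : List (Int × Int × Int) :=
  if i = j then [(i, i, i)]
  else if j < i then []
  else
    let stack := (PySem.List.pyRange i (j + 1) 1).foldl (pvStep (fun k => PySem.List.pyGetD B k 0)) []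
    pvEmitIter (pvCollapse stack) i j

-- ===== PRECONDITION & SPEC =====
-- Pre_ excludes exactly the inputs on which Python A raises IndexError: a nonempty
-- range i..j reaching an index outside the valid Python index range of B.
def Pre_maxRangeConquer (B : List Int) (i : Int) (j : Int) : Prop :=
  i = j ∨ j < i ∨ (-(B.length : Int) ≤ i ∧ j < (B.length : Int))
instance (B : List Int) (i : Int) (j : Int) : Decidable (Pre_maxRangeConquer B i j) := by
  unfold Pre_maxRangeConquer; infer_instance

def pvWitness_maxRangeConquer : List Int × Int × Int := ([1, 3, 2, 3], 0, 3)

def Spec_maxRangeConquer (B : List Int) (i : Int) (j : Int) (out : List (Int × Int × Int)) : Prop := out = maxRangeConquer_alt B i j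
instance (B : List Int) (i : Int) (j : Int) (out : List (Int × Int × Int)) : Decidable (Spec_maxRangeConquer B i j out) := by unfold Spec_maxRangeConquer; infer_instance

-- ===== CLAIM (what is proved, stated in full; the proofs are below) =====
def Claim_equal_maxRangeConquer : Prop := ∀ (B : List Int) (i : Int) (j : Int), Dom_maxRangeConquer B i j → Pre_maxRangeConquer B i j → Spec_maxRangeConquer B i j (maxRangeConquer B i j)

-- ===== LEMMAS AND PROOFS =====

-- recursive in-order traversal; pvEmitLoop is proved equal to it below
def pvEmit : PVTree → Int → Int → List (Int × Int × Int)
  | PVTree.leaf, _, _ => []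
  | PVTree.node l m r, lo, hi => pvEmit l lo (m - 1) ++ [(lo, m, hi)] ++ pvEmit r (m + 1) hi

def pvDenote : Sum (PVTree × Int × Int) (Int × Int × Int) → List (Int × Int × Int)
  | Sum.inl (t, lo, hi) => pvEmit t lo hi
  | Sum.inr x => [x]

-- A's recursion tree (the first-argmax Cartesian tree of the segment), proof-side only
def pvCt (v : Int → Int) (i j : Int) : PVTree :=
  if j < i then PVTree.leaf
  else
    PVTree.node (pvCt v i (pvMaxLoop v i j - 1)) (pvMaxLoop v i j) (pvCt v (pvMaxLoop v i j + 1) j)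
termination_by (j + 1 - i).toNat
decreasing_by
  · have hb := pvMaxLoop_bounds v i j (by omega); omega
  · have hb := pvMaxLoop_bounds v i j (by omega); omega

def pvSpine : PVTree → List (PVTree × Int)
  | PVTree.leaf => []
  | PVTree.node l m r => pvSpine r ++ [(l, m)]

def pvIns (v : Int → Int) : PVTree → Int → PVTree
  | PVTree.leaf, x => PVTree.node PVTree.leaf x PVTree.leaf
  | PVTree.node l m r, x =>
      if v m < v x then PVTree.node (PVTree.node l m r) x PVTree.leaf
      else PVTree.node l m (pvIns v r x)

-- right-spine values are non-decreasing from the top of the stack down to the root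
def pvSM (v : Int → Int) (s : List (PVTree × Int)) : Prop :=
  s.Pairwise (fun a b => v a.2 ≤ v b.2)

theorem pvCt_neg (v : Int → Int) (i j : Int) (h : j < i) : pvCt v i j = PVTree.leaf := by
  rw [pvCt, if_pos h]

theorem pvCt_pos (v : Int → Int) (i j : Int) (h : ¬ j < i) :
    pvCt v i j = PVTree.node (pvCt v i (pvMaxLoop v i j - 1)) (pvMaxLoop v i j)
      (pvCt v (pvMaxLoop v i j + 1) j) := by
  rw [pvCt]; rw [if_neg h]

theorem pvMaxLoop_empty (v : Int → Int) (i j : Int) (h : j < i) : pvMaxLoop v i j = i := by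
  unfold pvMaxLoop
  rw [PySem.List.pyRange_one_eq_nil (by omega)]
  rfl

theorem pvMaxLoop_last (v : Int → Int) (i j : Int) (h : i ≤ j) :
    pvMaxLoop v i j = if v (pvMaxLoop v i (j - 1)) < v j then j else pvMaxLoop v i (j - 1) := by
  unfold pvMaxLoop
  have h1 : j - 1 + 1 = j := by omega
  rw [h1, PySem.List.pyRange_one_succ_right h, List.foldl_append]
  simp

theorem pvMaxLoop_single (v : Int → Int) (i : Int) : pvMaxLoop v i i = i := by
  rw [pvMaxLoop_last v i i le_rfl, pvMaxLoop_empty v i (i - 1) (by omega)]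
  simp

theorem pvCollapse_spine (t : PVTree) : pvCollapse (pvSpine t) = t := by
  induction t with
  | leaf => rfl
  | node l m r ihl ihr =>
    simp only [pvSpine, pvCollapse, List.foldl_append, List.foldl_cons, List.foldl_nil] at *
    rw [ihr]

theorem pvCt_ins : ∀ (n : Nat) (v : Int → Int) (i j : Int), (j + 1 - i).toNat ≤ n → i ≤ j →
    pvCt v i j = pvIns v (pvCt v i (j - 1)) j := by
  intro n
  induction n with
  | zero => intro v i j hn hij; omega
  | succ n ih =>
    intro v i j hn hij
    by_cases hij' : i = j
    · subst hij'
      rw [pvCt_neg v i (i - 1) (by omega), pvCt_pos v i i (by omega), pvMaxLoop_single,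
        pvCt_neg v i (i - 1) (by omega), pvCt_neg v (i + 1) i (by omega)]
      rfl
    · have hlt : i < j := by omega
      have hb := pvMaxLoop_bounds v i (j - 1) (by omega)
      have hstep := pvMaxLoop_last v i j (by omega)
      rw [pvCt_pos v i (j - 1) (by omega)]
      by_cases hc : v (pvMaxLoop v i (j - 1)) < v j
      · rw [pvCt_pos v i j (by omega), hstep, if_pos hc]
        simp only [pvIns]
        rw [if_pos hc, pvCt_neg v (j + 1) j (by omega), pvCt_pos v i (j - 1) (by omega)]
      · rw [pvCt_pos v i j (by omega), hstep, if_neg hc]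
        simp only [pvIns]
        rw [if_neg hc, ih v (pvMaxLoop v i (j - 1) + 1) j (by omega) (by omega)]

theorem pvIns_spine_vals (v : Int → Int) (x : Int) :
    ∀ (t : PVTree), ∀ e ∈ pvSpine (pvIns v t x), v e.2 = v x ∨ ∃ e' ∈ pvSpine t, v e.2 = v e'.2 := by
  intro t
  induction t with
  | leaf => intro e he; simp only [pvIns, pvSpine] at he; simp at he; subst he; left; rfl
  | node l m r ihl ihr =>
    intro e he
    simp only [pvIns] at he
    by_cases hc : v m < v x
    · rw [if_pos hc] at he
      simp only [pvSpine, List.nil_append, List.mem_singleton] at he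
      subst he; left; rfl
    · rw [if_neg hc] at he
      simp only [pvSpine, List.mem_append, List.mem_singleton] at he
      rcases he with he | he
      · rcases ihr e he with h | ⟨e', he', hv⟩
        · left; exact h
        · right; exact ⟨e', by simp [pvSpine, he'], hv⟩
      · subst he; right; exact ⟨(l, m), by simp [pvSpine], rfl⟩

theorem pvSM_ins (v : Int → Int) (x : Int) :
    ∀ (t : PVTree), pvSM v (pvSpine t) → pvSM v (pvSpine (pvIns v t x)) := by
  intro t
  induction t with
  | leaf => intro _; simp [pvIns, pvSpine, pvSM]
  | node l m r ihl ihr =>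
    intro hsm
    simp only [pvSpine, pvSM, List.pairwise_append] at hsm
    obtain ⟨hr, _, hcross⟩ := hsm
    simp only [pvIns]
    by_cases hc : v m < v x
    · rw [if_pos hc]; simp [pvSpine, pvSM]
    · rw [if_neg hc]
      simp only [pvSpine, pvSM, List.pairwise_append]
      refine ⟨ihr hr, by simp, ?_⟩
      intro a ha b hb
      simp only [List.mem_singleton] at hb
      subst hb
      rcases pvIns_spine_vals v x r a ha with h | ⟨e', he', hv⟩
      · rw [h]; show v x ≤ v m; omega
      · rw [hv]; exact hcross e' he' (l, m) (by simp)

theorem pvPopLoop_all (v : Int → Int) (x : Int) :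
    ∀ (s : List (PVTree × Int)) (acc : PVTree), (∀ e ∈ s, v e.2 < v x) →
      pvPopLoop v x s acc = (s.foldl (fun a e => PVTree.node e.1 e.2 a) acc, []) := by
  intro s
  induction s with
  | nil => intro acc _; rfl
  | cons e s ih =>
    intro acc h
    obtain ⟨t, m⟩ := e
    simp only [pvPopLoop]
    rw [if_pos (h (t, m) (by simp)), ih _ (fun e he => h e (by simp [he]))]
    rfl

theorem pvPopLoop_append_stop (v : Int → Int) (x : Int) (e : PVTree × Int)
    (he : ¬ v e.2 < v x) :
    ∀ (s : List (PVTree × Int)) (acc : PVTree),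
      pvPopLoop v x (s ++ [e]) acc = ((pvPopLoop v x s acc).1, (pvPopLoop v x s acc).2 ++ [e]) := by
  intro s
  induction s with
  | nil =>
    intro acc
    obtain ⟨t, m⟩ := e
    simp [pvPopLoop, he]
  | cons f s ih =>
    intro acc
    obtain ⟨t, m⟩ := f
    simp only [List.cons_append, pvPopLoop]
    by_cases hc : v m < v x
    · rw [if_pos hc, if_pos hc]
      exact ih _
    · rw [if_neg hc, if_neg hc]
      simp

theorem pvStep_spine (v : Int → Int) (x : Int) :
    ∀ (t : PVTree), pvSM v (pvSpine t) → pvStep v (pvSpine t) x = pvSpine (pvIns v t x) := by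
  intro t
  induction t with
  | leaf => intro _; rfl
  | node l m r ihl ihr =>
    intro hsm
    simp only [pvSpine, pvSM, List.pairwise_append] at hsm
    obtain ⟨hr, _, hcross⟩ := hsm
    by_cases hc : v m < v x
    · have hall : ∀ e ∈ pvSpine r ++ [(l, m)], v e.2 < v x := by
        intro e he
        simp only [List.mem_append, List.mem_singleton] at he
        rcases he with he | he
        · have h2 : v e.2 ≤ v m := hcross e he (l, m) (by simp)
          omega
        · subst he; exact hc
      simp only [pvStep, pvSpine]
      rw [pvPopLoop_all v x _ PVTree.leaf hall]
      have hcoll : (pvSpine r ++ [(l, m)]).foldl (fun a e => PVTree.node e.1 e.2 a) PVTree.leaf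
          = PVTree.node l m r := by
        rw [List.foldl_append]
        simp only [List.foldl_cons, List.foldl_nil]
        have := pvCollapse_spine r
        simp only [pvCollapse] at this
        rw [this]
      rw [hcoll]
      simp only [pvIns, if_pos hc, pvSpine, List.nil_append]
    · simp only [pvStep, pvSpine]
      rw [pvPopLoop_append_stop v x (l, m) hc]
      have ihr' := ihr hr
      simp only [pvStep] at ihr'
      simp only [pvIns, if_neg hc, pvSpine]
      rw [← ihr']
      simp

theorem pvSM_ct : ∀ (n : Nat) (v : Int → Int) (i j : Int), (j + 1 - i).toNat ≤ n →
    pvSM v (pvSpine (pvCt v i j)) := by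
  intro n
  induction n with
  | zero =>
    intro v i j hn
    rw [pvCt_neg v i j (by omega)]
    simp [pvSpine, pvSM]
  | succ n ih =>
    intro v i j hn
    by_cases h : j < i
    · rw [pvCt_neg v i j h]; simp [pvSpine, pvSM]
    · rw [pvCt_ins (n + 1) v i j hn (by omega)]
      exact pvSM_ins v j _ (ih v i (j - 1) (by omega))

theorem pvStack_ct : ∀ (n : Nat) (v : Int → Int) (i j : Int), (j + 1 - i).toNat ≤ n →
    (PySem.List.pyRange i (j + 1) 1).foldl (pvStep v) [] = pvSpine (pvCt v i j) := by
  intro n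
  induction n with
  | zero =>
    intro v i j hn
    rw [PySem.List.pyRange_one_eq_nil (by omega), pvCt_neg v i j (by omega)]
    rfl
  | succ n ih =>
    intro v i j hn
    by_cases h : j < i
    · rw [PySem.List.pyRange_one_eq_nil (by omega), pvCt_neg v i j (by omega)]
      rfl
    · rw [PySem.List.pyRange_one_succ_right (by omega : i ≤ j), List.foldl_append]
      simp only [List.foldl_cons, List.foldl_nil]
      have ihj := ih v i (j - 1) (by omega)
      have hj : j - 1 + 1 = j := by omega
      rw [hj] at ihj
      rw [ihj, pvStep_spine v j _ (pvSM_ct n v i (j - 1) (by omega)),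
        ← pvCt_ins (n + 1) v i j hn (by omega)]

theorem pvA_emit : ∀ (n : Nat) (B : List Int) (i j : Int), (j + 1 - i).toNat ≤ n →
    maxRangeConquer B i j = pvEmit (pvCt (fun k => PySem.List.pyGetD B k 0) i j) i j := by
  intro n
  induction n with
  | zero =>
    intro B i j hn
    rw [maxRangeConquer]
    rw [dif_neg (by omega : ¬ i = j), dif_pos (by omega : j < i),
      pvCt_neg _ i j (by omega)]
    rfl
  | succ n ih =>
    intro B i j hn
    by_cases h1 : i = j
    · subst h1
      rw [maxRangeConquer, dif_pos rfl,
        pvCt_pos _ i i (by omega), pvMaxLoop_single,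
        pvCt_neg _ i (i - 1) (by omega), pvCt_neg _ (i + 1) i (by omega)]
      rfl
    · by_cases h2 : j < i
      · rw [maxRangeConquer, dif_neg h1, dif_pos h2, pvCt_neg _ i j (by omega)]
        rfl
      · have hb := pvMaxLoop_bounds (fun k => PySem.List.pyGetD B k 0) i j (by omega)
        rw [maxRangeConquer, dif_neg h1, dif_neg h2]
        simp only []
        rw [pvCt_pos _ i j (by omega)]
        simp only [pvEmit]
        rw [ih B i (pvMaxLoop (fun k => PySem.List.pyGetD B k 0) i j - 1) (by omega),
          ih B (pvMaxLoop (fun k => PySem.List.pyGetD B k 0) i j + 1) j (by omega)]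

theorem pvEmitLoop_denote :
    ∀ (items : List (Sum (PVTree × Int × Int) (Int × Int × Int))) (out : List (Int × Int × Int)),
      pvEmitLoop items out = out ++ (items.map pvDenote).flatten := by
  intro items out
  induction items, out using pvEmitLoop.induct with
  | case1 out => simp [pvEmitLoop]
  | case2 x rest out ih => simp [pvEmitLoop, pvDenote, ih]
  | case3 lo hi rest out ih => simp [pvEmitLoop, pvDenote, pvEmit, ih]
  | case4 l m r lo hi rest out ih => simp [pvEmitLoop, pvDenote, pvEmit, ih]

theorem pvEmitIter_eq (t : PVTree) (lo hi : Int) : pvEmitIter t lo hi = pvEmit t lo hi := by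
  rw [pvEmitIter, pvEmitLoop_denote]
  simp [pvDenote]

-- ===== VERDICT (by name: the statement is the Claim_ definition above) =====
theorem maxRangeConquer_spec : Claim_equal_maxRangeConquer := by
  intro B i j _hdom _hpre
  show maxRangeConquer B i j = maxRangeConquer_alt B i j
  by_cases h1 : i = j
  · rw [maxRangeConquer, dif_pos h1]
    unfold maxRangeConquer_alt
    rw [if_pos h1]
  · by_cases h2 : j < i
    · rw [maxRangeConquer, dif_neg h1, dif_pos h2]
      unfold maxRangeConquer_alt
      rw [if_neg h1, if_pos h2]
    · unfold maxRangeConquer_alt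
      rw [if_neg h1, if_neg h2]
      simp only []
      rw [pvStack_ct ((j + 1 - i).toNat) (fun k => PySem.List.pyGetD B k 0) i j le_rfl,
        pvCollapse_spine, pvEmitIter_eq]
      exact pvA_emit ((j + 1 - i).toNat) B i j le_rfl
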